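-- pv_equiv track=rewrite | github.com/picasso653/codesignal_-codes | Interview Prep/1d_gamepath_evaluation.py | evaluatePath
-- ===== SOURCE A (Python) =====
-- def evaluatePath(numbers):
--     n = len(numbers)
--     position = 0  # Start at the first position
--     moves = 0  # Counter for moves
--     direction = 1  # 1 for right, -1 for left
--     reversed_once = False  # To track if direction has been reversed
--
--     while True:
--         step = numbers[position] * direction  # Determine actual movement
--
--         if step == 0:
--             break  # Blockade encountered, game ends
--
--         new_position = position + step
--
--         if new_position < 0 or new_position >= n:
--             if reversed_once:
--                 break  # If already reversed, game ends
--             direction *= -1  # Reverse the direction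
--             reversed_once = True
--         else:
--             position = new_position  # Move to the new position
--             moves += 1
--
--     return (position, moves)
-- ===== SOURCE B (Python) =====
-- def evaluatePath(numbers):
--     n = len(numbers)
--
--     def table(direction):
--         # Precompute a tagged transition table: for each index i,
--         # ('stop', i) if the cell blocks, ('to', target) for an in-board move,
--         # ('out', i) if the move would leave the board.
--         t = []
--         for i, v in enumerate(numbers):
--             step = v * direction
--             if step == 0:
--                 t.append(('stop', i))
--             elif 0 <= i + step < n:
--                 t.append(('to', i + step))
--             else:
--                 t.append(('out', i))
--         return t
--
--     def chase(t, pos):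
--         # Pure pointer chase over a precomputed table: no arithmetic, no bounds tests.
--         moves = 0
--         while t[pos][0] == 'to':
--             pos = t[pos][1]
--             moves += 1
--         return (t[pos][0], pos, moves)
--
--     tag, pos, m1 = chase(table(1), 0)
--     if tag == 'stop':
--         return (pos, m1)
--     _, pos, m2 = chase(table(-1), pos)
--     return (pos, m1 + m2)
-- ===== Notes on version B (the rewrite author's own statement) =====
-- stated objective: alternative
-- what changed: All game logic (zero test, bounds test, direction) is compiled once into two precomputed tagged transition tables, and the walk becomes a pure tag-driven pointer chase over the tables (rightward table from 0, then leftward table), instead of A's single loop with mutable direction/reversed_once flags and per-step arithmetic tests.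
import Mathlib
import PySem

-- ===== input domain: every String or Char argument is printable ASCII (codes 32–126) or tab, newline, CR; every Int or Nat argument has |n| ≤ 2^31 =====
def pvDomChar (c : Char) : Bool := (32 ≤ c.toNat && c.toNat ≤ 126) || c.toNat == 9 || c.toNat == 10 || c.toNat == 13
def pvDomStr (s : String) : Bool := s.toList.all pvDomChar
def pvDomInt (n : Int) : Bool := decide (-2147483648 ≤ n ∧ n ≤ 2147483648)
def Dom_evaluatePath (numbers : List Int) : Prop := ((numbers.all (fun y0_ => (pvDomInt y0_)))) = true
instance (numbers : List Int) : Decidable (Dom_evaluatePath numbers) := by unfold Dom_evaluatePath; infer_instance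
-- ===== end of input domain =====

-- B precomputes two tagged transition tables (right/left) and replaces A's flagged
-- simulation loop by a pure pointer chase over them; equality of return values is proved.

-- ===== PORT A =====
-- A's while-True loop over state (position, moves, direction, reversed_once); fuel
-- recursion, `none` = fuel exhausted (unreachable under Pre_, which demands termination).
def evalLoopA (numbers : List Int) (nn : Int) : Nat → Int → Int → Int → Bool → Option (Int × Int)
  | 0, _, _, _, _ => none
  | fuel+1, pos, moves, dir, revd =>
    let step := (PySem.List.pyGet? numbers pos).getD 0 * dir
    if step = 0 then some (pos, moves)
    else
      let newPos := pos + step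
      if newPos < 0 ∨ nn ≤ newPos then
        if revd then some (pos, moves)
        else evalLoopA numbers nn fuel pos moves (-dir) true
      else evalLoopA numbers nn fuel newPos (moves + 1) dir revd

def evaluatePath (numbers : List Int) : Int × Int :=
  (evalLoopA numbers numbers.length (2 * numbers.length + 2) 0 0 1 false).getD (0, 0)

-- ===== PORT B =====
-- Source B's table(direction): a for-append loop over enumerate(numbers).
def tableB (numbers : List Int) (nn : Int) (dir : Int) : List (String × Int) :=
  (PySem.List.enumerate numbers).foldl
    (fun t iv =>
      let step := iv.2 * dir
      t ++ [if step = 0 then ("stop", iv.1)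
            else if 0 ≤ iv.1 + step ∧ iv.1 + step < nn then ("to", iv.1 + step)
            else ("out", iv.1)]) []

-- Source B's chase(t, pos): pointer chase over the table; fuel recursion, `none` = fuel
-- exhausted (unreachable under Pre_).
def chaseB (t : List (String × Int)) : Nat → Int → Int → Option (String × Int × Int)
  | 0, _, _ => none
  | fuel+1, pos, moves =>
    let e := (PySem.List.pyGet? t pos).getD ("", 0)
    if e.1 = "to" then chaseB t fuel e.2 (moves + 1)
    else some (e.1, pos, moves)

def evaluatePath_alt (numbers : List Int) : Int × Int :=
  let nn : Int := numbers.length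
  match chaseB (tableB numbers nn 1) (2 * numbers.length + 2) 0 0 with
  | none => (0, 0)
  | some (tag, pos, m1) =>
    if tag = "stop" then (pos, m1)
    else
      match chaseB (tableB numbers nn (-1)) (2 * numbers.length + 2) pos 0 with
      | none => (0, 0)
      | some (_, pos2, m2) => (pos2, m1 + m2)

-- ===== PRECONDITION & SPEC =====
-- One transition of A's game state (position, direction, reversed_once); none = the game ends here.
def pvStep (numbers : List Int) (nn : Int) (s : Int × Int × Bool) : Option (Int × Int × Bool) :=
  let step := (PySem.List.pyGet? numbers s.1).getD 0 * s.2.1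
  if step = 0 then none
  else
    let newPos := s.1 + step
    if newPos < 0 ∨ nn ≤ newPos then (if s.2.2 then none else some (s.1, -s.2.1, true))
    else some (newPos, s.2.1, s.2.2)

-- Pre_ excludes the empty list (A raises IndexError) and the inputs on which A's walk
-- cycles forever (A returns nothing there); every walk that halts does so within
-- 2*len+2 transitions (at most 2*len distinct states), so Pre_ admits every input A returns on.
def Pre_evaluatePath (numbers : List Int) : Prop :=
  numbers ≠ [] ∧
    (fun o => Option.bind o (pvStep numbers numbers.length))^[2 * numbers.length + 2]
      (some (0, 1, false)) = none
instance (numbers : List Int) : Decidable (Pre_evaluatePath numbers) := by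
  unfold Pre_evaluatePath; infer_instance

def pvWitness_evaluatePath : List Int := [1, 0]

def Spec_evaluatePath (numbers : List Int) (out : Int × Int) : Prop := out = evaluatePath_alt numbers
instance (numbers : List Int) (out : Int × Int) : Decidable (Spec_evaluatePath numbers out) := by unfold Spec_evaluatePath; infer_instance

-- ===== CLAIM (what is proved, stated in full; the proofs are below) =====
def Claim_equal_evaluatePath : Prop := ∀ (numbers : List Int), Dom_evaluatePath numbers → Pre_evaluatePath numbers → Spec_evaluatePath numbers (evaluatePath numbers)

-- ===== LEMMAS AND PROOFS =====

-- The table entry at an in-range position is the classification of that cell.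
lemma table_get (numbers : List Int) (dir pos : Int)
    (h0 : 0 ≤ pos) (h1 : pos < numbers.length) :
    (PySem.List.pyGet? (tableB numbers numbers.length dir) pos).getD ("", 0)
      = (let step := (PySem.List.pyGet? numbers pos).getD 0 * dir
         if step = 0 then ("stop", pos)
         else if 0 ≤ pos + step ∧ pos + step < (numbers.length : Int) then ("to", pos + step)
         else ("out", pos)) := by
  unfold tableB
  rw [PySem.List.foldl_append_singleton_eq_map]
  obtain ⟨k, rfl⟩ : ∃ k : Nat, pos = (k : Int) := ⟨pos.toNat, by omega⟩
  have hk : k < numbers.length := by exact_mod_cast h1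
  rw [PySem.List.pyGet?_natCast, List.nil_append]
  rw [List.getElem?_map, PySem.List.getElem?_enumerate]
  have : numbers[k]? = some numbers[k] := List.getElem?_eq_getElem hk
  rw [this]
  simp only [Option.map_some, Option.getD_some, zero_add]
  have hget : (PySem.List.pyGet? numbers (k : Int)).getD 0 = numbers[k] := by
    rw [PySem.List.pyGet?_natCast, this]; rfl
  rw [hget]

-- One unfolding of the chase at an in-range position of A's board.
lemma chase_step (numbers : List Int) (dir : Int) (fuel : Nat) (pos moves : Int)
    (h0 : 0 ≤ pos) (h1 : pos < numbers.length) :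
    chaseB (tableB numbers numbers.length dir) (fuel + 1) pos moves
      = (let step := (PySem.List.pyGet? numbers pos).getD 0 * dir
         if step = 0 then some ("stop", pos, moves)
         else if pos + step < 0 ∨ (numbers.length : Int) ≤ pos + step then some ("out", pos, moves)
         else chaseB (tableB numbers numbers.length dir) fuel (pos + step) (moves + 1)) := by
  simp only [chaseB, table_get numbers dir pos h0 h1]
  by_cases hz : (PySem.List.pyGet? numbers pos).getD 0 * dir = 0
  · simp [hz]
  · simp only [hz, if_false]
    by_cases hin : 0 ≤ pos + (PySem.List.pyGet? numbers pos).getD 0 * dir ∧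
        pos + (PySem.List.pyGet? numbers pos).getD 0 * dir < (numbers.length : Int)
    · have hout : ¬ (pos + (PySem.List.pyGet? numbers pos).getD 0 * dir < 0 ∨
          (numbers.length : Int) ≤ pos + (PySem.List.pyGet? numbers pos).getD 0 * dir) := by omega
      simp [hin, hout]
    · have hout : pos + (PySem.List.pyGet? numbers pos).getD 0 * dir < 0 ∨
          (numbers.length : Int) ≤ pos + (PySem.List.pyGet? numbers pos).getD 0 * dir := by omega
      simp [hin, hout]

-- Phase 2: A's loop with direction = -1 and reversed_once = true is B's chase over the
-- leftward table (its tag discarded).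
lemma phase2 (numbers : List Int) : ∀ (fuel : Nat) (pos moves : Int),
    0 ≤ pos → pos < numbers.length →
    evalLoopA numbers numbers.length fuel pos moves (-1) true
      = (chaseB (tableB numbers numbers.length (-1)) fuel pos moves).map
          (fun r => (r.2.1, r.2.2)) := by
  intro fuel
  induction fuel with
  | zero => intro pos moves _ _; simp [evalLoopA, chaseB]
  | succ f ih =>
    intro pos moves h0 h1
    rw [chase_step numbers (-1) f pos moves h0 h1]
    simp only [evalLoopA]
    split_ifs with hz hb
    · simp
    · simp
    · exact ih _ _ (by omega) (by omega)

-- Shifting the move accumulator of a chase.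
lemma chase_shift (t : List (String × Int)) : ∀ (fuel : Nat) (pos a b : Int),
    chaseB t fuel pos (a + b)
      = (chaseB t fuel pos b).map (fun r => (r.1, r.2.1, a + r.2.2)) := by
  intro fuel
  induction fuel with
  | zero => intro pos a b; simp [chaseB]
  | succ f ih =>
    intro pos a b
    simp only [chaseB]
    split_ifs with h1
    · have := ih ((PySem.List.pyGet? t pos).getD ("", 0)).2 a (b + 1)
      simpa [add_assoc] using this
    · simp

-- A successful chase is stable under extra fuel.
lemma chase_mono (t : List (String × Int)) : ∀ (fuel k : Nat) (pos moves : Int)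
    (r : String × Int × Int), chaseB t fuel pos moves = some r →
    chaseB t (fuel + k) pos moves = some r := by
  intro fuel
  induction fuel with
  | zero => intro k pos moves r h; simp [chaseB] at h
  | succ f ih =>
    intro k pos moves r h
    have hk : f + 1 + k = (f + k) + 1 := by omega
    rw [hk]
    simp only [chaseB] at h ⊢
    split_ifs at h ⊢ with h1
    · exact ih k _ _ r h
    · exact h

-- Phase 1: A's loop with direction = 1 and reversed_once = false either ends where
-- B's rightward chase ends on "stop", or continues as a phase-2 run (in range, with
-- strictly less fuel) from where that chase hits "out".
lemma phase1 (numbers : List Int) : ∀ (fuel : Nat) (pos moves : Int) (r : Int × Int),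
    0 ≤ pos → pos < numbers.length →
    evalLoopA numbers numbers.length fuel pos moves 1 false = some r →
    (∃ p m, chaseB (tableB numbers numbers.length 1) fuel pos moves = some ("stop", p, m)
        ∧ r = (p, m)) ∨
    (∃ p m g, g < fuel ∧
        chaseB (tableB numbers numbers.length 1) fuel pos moves = some ("out", p, m) ∧
        0 ≤ p ∧ p < numbers.length ∧
        evalLoopA numbers numbers.length g p m (-1) true = some r) := by
  intro fuel
  induction fuel with
  | zero => intro pos moves r _ _ h; simp [evalLoopA] at h
  | succ f ih =>
    intro pos moves r h0 h1 h
    rw [chase_step numbers 1 f pos moves h0 h1]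
    simp only [evalLoopA, Bool.false_eq_true, if_false] at h
    simp only [mul_one] at h ⊢
    by_cases hz : (PySem.List.pyGet? numbers pos).getD 0 = 0
    · rw [if_pos hz] at h
      left; exact ⟨pos, moves, by simp [hz], by simpa using h.symm⟩
    · rw [if_neg hz] at h
      by_cases hb : pos + (PySem.List.pyGet? numbers pos).getD 0 < 0 ∨
          (numbers.length : Int) ≤ pos + (PySem.List.pyGet? numbers pos).getD 0
      · rw [if_pos hb] at h
        right
        refine ⟨pos, moves, f, Nat.lt_succ_self f, by simp [hz, hb], h0, h1, h⟩
      · rw [if_neg hb] at h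
        rcases ih _ _ _ (by omega) (by omega) h with ⟨p, m, hw, hr⟩ | ⟨p, m, g, hg, hw, hp0, hp1, he⟩
        · left; exact ⟨p, m, by simp [hz, hb, hw], hr⟩
        · right; exact ⟨p, m, g, Nat.lt_succ_of_lt hg, by simp [hz, hb, hw], hp0, hp1, he⟩

-- If the game-state trajectory halts within `fuel` transitions, A's loop returns within `fuel`.
lemma halts_isSome (numbers : List Int) (nn : Int) : ∀ (fuel : Nat) (pos moves dir : Int) (revd : Bool),
    (fun o => Option.bind o (pvStep numbers nn))^[fuel] (some (pos, dir, revd)) = none →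
    (evalLoopA numbers nn fuel pos moves dir revd).isSome := by
  intro fuel
  induction fuel with
  | zero => intro pos moves dir revd h; simp at h
  | succ f ih =>
    intro pos moves dir revd h
    rw [Function.iterate_succ_apply] at h
    simp only [Option.bind_some] at h
    simp only [evalLoopA]
    by_cases h1 : (PySem.List.pyGet? numbers pos).getD 0 * dir = 0
    · simp [h1]
    · have hps : pvStep numbers nn (pos, dir, revd)
          = (if pos + (PySem.List.pyGet? numbers pos).getD 0 * dir < 0 ∨
                nn ≤ pos + (PySem.List.pyGet? numbers pos).getD 0 * dir then
              (if revd then none else some (pos, -dir, true))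
            else some (pos + (PySem.List.pyGet? numbers pos).getD 0 * dir, dir, revd)) := by
        simp only [pvStep]
        rw [if_neg h1]
      rw [hps] at h
      simp only [if_neg h1]
      by_cases h2 : pos + (PySem.List.pyGet? numbers pos).getD 0 * dir < 0 ∨
          nn ≤ pos + (PySem.List.pyGet? numbers pos).getD 0 * dir
      · rw [if_pos h2] at h ⊢
        cases revd with
        | true => simp
        | false =>
          simp only [Bool.false_eq_true, if_false] at h ⊢
          exact ih _ _ _ _ h
      · rw [if_neg h2] at h ⊢
        exact ih _ _ _ _ h

lemma map_eq_some_elim {α β : Type} {o : Option α} {f : α → β} {r : β}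
    (h : o.map f = some r) : ∃ x, o = some x ∧ f x = r := by
  cases o with
  | none => simp at h
  | some x => exact ⟨x, rfl, by simpa using h⟩

-- ===== VERDICT (by name: the statement is the Claim_ definition above) =====
theorem evaluatePath_spec : Claim_equal_evaluatePath := by
  intro numbers _ pre
  obtain ⟨hne, hterm⟩ := pre
  have hlen : 0 < numbers.length := List.length_pos_iff.mpr hne
  unfold Spec_evaluatePath evaluatePath evaluatePath_alt
  set F : Nat := 2 * numbers.length + 2 with hF
  have hsome := halts_isSome numbers numbers.length F 0 0 1 false hterm
  obtain ⟨r, hA⟩ := Option.isSome_iff_exists.mp hsome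
  rw [hA]
  rcases phase1 numbers F 0 0 r (le_refl 0) (by exact_mod_cast hlen) hA with
    ⟨p, m, hw, hr⟩ | ⟨p, m, g, hg, hw, hp0, hp1, he⟩
  · simp only [hw, Option.getD_some]
    simpa using hr
  · simp only [hw]
    have hstop : ("out" : String) ≠ "stop" := by decide
    rw [phase2 numbers g p m hp0 hp1] at he
    obtain ⟨⟨tg, p2, m2⟩, hwg, hfr⟩ := map_eq_some_elim he
    have hsplit : chaseB (tableB numbers numbers.length (-1)) g p m
        = (chaseB (tableB numbers numbers.length (-1)) g p 0).map
            (fun r => (r.1, r.2.1, m + r.2.2)) := by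
      simpa using chase_shift (tableB numbers numbers.length (-1)) g p m 0
    rw [hsplit] at hwg
    obtain ⟨⟨tg', p2', m2'⟩, hw0, hf0⟩ := map_eq_some_elim hwg
    have hF0 : chaseB (tableB numbers numbers.length (-1)) F p 0 = some (tg', p2', m2') := by
      have := chase_mono (tableB numbers numbers.length (-1)) g (F - g) p 0 (tg', p2', m2') hw0
      rwa [Nat.add_sub_cancel' (Nat.le_of_lt hg)] at this
    simp only [hstop, hF0]
    simp only [Prod.mk.injEq] at hf0
    obtain ⟨-, e1, e2⟩ := hf0
    simp [← hfr, e1, ← e2]
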